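-- pv_equiv track=rewrite | github.com/Bhardwaj-Saurabh/Procurement_Sentinel_Autonomous_Tender_Triage_-_Compliance_Intelligence_System | src/ingestion/chunker.py | _join_sentences
-- ===== SOURCE A (Python) =====
-- def _join_sentences(sentences: list[str]) -> str:
--     """
--     Join sentences back into text.
--
--     Args:
--         sentences: List of sentences (may include <PARA_BREAK> markers)
--
--     Returns:
--         Joined text
--     """
--     result_parts = []
--     current_para = []
--
--     for s in sentences:
--         if s == "<PARA_BREAK>":
--             if current_para:
--                 result_parts.append(" ".join(current_para))
--                 current_para = []
--         else:
--             current_para.append(s)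
--
--     if current_para:
--         result_parts.append(" ".join(current_para))
--
--     return "\n\n".join(result_parts)
-- ===== SOURCE B (Python) =====
-- def _join_sentences(sentences: list[str]) -> str:
--     """Two-pointer run scan: find each maximal run of non-marker sentences, join it
--     as one paragraph, skip markers; no flush-at-marker accumulator."""
--     paras = []
--     i, n = 0, len(sentences)
--     while i < n:
--         if sentences[i] == "<PARA_BREAK>":
--             i += 1
--             continue
--         j = i + 1
--         while j < n and sentences[j] != "<PARA_BREAK>":
--             j += 1
--         paras.append(" ".join(sentences[i:j]))
--         i = j
--     return "\n\n".join(paras)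
-- ===== Notes on version B (the rewrite author's own statement) =====
-- stated objective: alternative
-- what changed: Replaces A's per-sentence accumulator that is flushed at each marker with a two-pointer scan that locates each maximal run of non-marker sentences and joins the slice in one step.
import Mathlib
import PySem

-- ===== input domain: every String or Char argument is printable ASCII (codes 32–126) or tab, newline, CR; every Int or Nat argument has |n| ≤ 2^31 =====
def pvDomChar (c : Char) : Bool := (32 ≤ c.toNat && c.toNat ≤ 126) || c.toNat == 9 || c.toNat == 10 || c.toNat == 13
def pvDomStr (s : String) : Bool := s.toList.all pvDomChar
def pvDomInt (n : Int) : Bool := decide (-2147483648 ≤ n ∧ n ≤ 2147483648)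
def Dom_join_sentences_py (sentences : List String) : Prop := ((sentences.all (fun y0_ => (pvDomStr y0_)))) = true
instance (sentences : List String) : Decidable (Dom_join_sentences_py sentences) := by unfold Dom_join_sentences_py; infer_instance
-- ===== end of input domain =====

-- B replaces A's flush-at-marker accumulator with a two-pointer scan over maximal
-- non-marker runs (objective: alternative decomposition, same cost).


-- ===== PORT A =====
-- fold state = (result_parts, current_para), exactly A's loop
def pvStepA (st : List String × List String) (s : String) : List String × List String :=
  if s = "<PARA_BREAK>" then
    if st.2 ≠ [] then (st.1 ++ [PySem.Str.join " " st.2], []) else st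
  else (st.1, st.2 ++ [s])

def join_sentences_py (sentences : List String) : String :=
  let st := sentences.foldl pvStepA ([], [])
  let parts := if st.2 ≠ [] then st.1 ++ [PySem.Str.join " " st.2] else st.1
  PySem.Str.join "\n\n" parts

-- ===== PORT B =====
-- inner while loop of B: collect the maximal run of non-marker sentences, return (run, rest)
def pvRun : List String → List String × List String
  | [] => ([], [])
  | s :: rest =>
    if s = "<PARA_BREAK>" then ([], s :: rest)
    else
      let p := pvRun rest
      (s :: p.1, p.2)

theorem pvRun_len : ∀ l : List String, (pvRun l).2.length ≤ l.length
  | [] => Nat.le_refl _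
  | s :: rest => by
    simp only [pvRun]
    split
    · simp
    · exact Nat.le_succ_of_le (pvRun_len rest)

-- outer while loop of B: one paragraph per run, markers skipped
def pvParas : List String → List String
  | [] => []
  | s :: rest =>
    if s = "<PARA_BREAK>" then pvParas rest
    else
      let p := pvRun rest
      PySem.Str.join " " (s :: p.1) :: pvParas p.2
termination_by l => l.length
decreasing_by
  · simp
  · exact Nat.lt_succ_of_le (pvRun_len rest)

def join_sentences_py_alt (sentences : List String) : String :=
  PySem.Str.join "\n\n" (pvParas sentences)

-- ===== PRECONDITION & SPEC =====
def Spec_join_sentences_py (sentences : List String) (out : String) : Prop := out = join_sentences_py_alt sentences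
instance (sentences : List String) (out : String) : Decidable (Spec_join_sentences_py sentences out) := by unfold Spec_join_sentences_py; infer_instance

-- ===== CLAIM (what is proved, stated in full; the proofs are below) =====
def Claim_equal_join_sentences_py : Prop := ∀ (sentences : List String), Dom_join_sentences_py sentences → Spec_join_sentences_py sentences (join_sentences_py sentences)

-- ===== LEMMAS AND PROOFS =====
-- the parts A will end up producing from loop state current_para = cur over remaining input l
def pvRest (cur l : List String) : List String :=
  if cur = [] then pvParas l
  else PySem.Str.join " " (cur ++ (pvRun l).1) :: pvParas (pvRun l).2

def pvFin (st : List String × List String) : List String :=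
  if st.2 ≠ [] then st.1 ++ [PySem.Str.join " " st.2] else st.1

theorem pvMain : ∀ (l parts cur : List String),
    pvFin (l.foldl pvStepA (parts, cur)) = parts ++ pvRest cur l := by
  intro l
  induction l with
  | nil =>
    intro parts cur
    by_cases h : cur = [] <;>
      simp [pvFin, pvRest, h, pvParas, pvRun]
  | cons s rest ih =>
    intro parts cur
    by_cases hm : s = "<PARA_BREAK>"
    · by_cases hc : cur = []
      · simp [List.foldl_cons, pvStepA, hm, hc, ih, pvRest, pvParas]
      · simp [List.foldl_cons, pvStepA, hm, hc, ih, pvRest, pvParas, pvRun]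
    · have hne : cur ++ [s] ≠ [] := by simp
      have hr : pvRun (s :: rest) = (s :: (pvRun rest).1, (pvRun rest).2) := by
        simp [pvRun, hm]
      by_cases hc : cur = [] <;>
        simp [List.foldl_cons, pvStepA, hm, hc, ih, pvRest, pvParas, hne, hr]

-- ===== VERDICT (by name: the statement is the Claim_ definition above) =====
theorem join_sentences_py_spec : Claim_equal_join_sentences_py := by
  intro sentences _
  show join_sentences_py sentences = join_sentences_py_alt sentences
  unfold join_sentences_py join_sentences_py_alt
  have h := pvMain sentences [] []
  simp only [pvFin] at h
  simp [h, pvRest]
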